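-- pv_equiv track=rewrite | github.com/notforyou23/COSMO_BrainStudio | brains/ArtandMusic2.brain/outputs/code-creation/agent_1766619950232_zqml9aq/scripts/lib/output_discovery.py | _root_hint
-- ===== SOURCE A (Python) =====
-- from typing import Iterable, Optional, List, Dict, Any, Tuple
--
-- def _root_hint(parts: Tuple[str, ...]) -> str:
--     for part in parts:
--         pl = part.lower()
--         if pl in ('code-creation', 'document-creation', 'data-creation', 'image-creation'):
--             return pl
--     # fall back to common buckets
--     for part in parts:
--         pl = part.lower()
--         if pl in ('runtime', 'outputs', 'agent_outputs'):
--             return pl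
--     return 'unknown'
-- ===== SOURCE B (Python) =====
-- from typing import Tuple
--
-- def _root_hint(parts: Tuple[str, ...]) -> str:
--     fallback = None
--     for part in parts:
--         pl = part.lower()
--         if pl in ('code-creation', 'document-creation', 'data-creation', 'image-creation'):
--             return pl
--         if fallback is None and pl in ('runtime', 'outputs', 'agent_outputs'):
--             fallback = pl
--     return fallback if fallback is not None else 'unknown'
-- ===== Notes on version B (the rewrite author's own statement) =====
-- stated objective: simpler
-- what changed: Replaced the two full scans (primary pass then secondary pass) by a single pass that returns a primary match immediately and records the first secondary match in an accumulator.
import Mathlib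
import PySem

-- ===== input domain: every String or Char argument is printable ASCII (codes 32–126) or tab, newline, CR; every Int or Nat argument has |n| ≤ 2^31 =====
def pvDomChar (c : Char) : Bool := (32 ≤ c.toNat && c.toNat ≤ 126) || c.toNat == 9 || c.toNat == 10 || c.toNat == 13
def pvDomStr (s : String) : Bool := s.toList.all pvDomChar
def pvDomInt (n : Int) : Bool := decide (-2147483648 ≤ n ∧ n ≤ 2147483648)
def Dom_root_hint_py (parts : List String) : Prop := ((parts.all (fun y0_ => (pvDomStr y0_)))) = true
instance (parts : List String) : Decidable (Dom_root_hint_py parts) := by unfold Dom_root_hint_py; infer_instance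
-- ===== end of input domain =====

-- B merges A's two scans into one pass with a first-secondary-match accumulator; objective: simpler.

-- ===== PORT A =====
def pvIsPrimary (pl : String) : Bool :=
  pl == "code-creation" || pl == "document-creation" || pl == "data-creation" || pl == "image-creation"

def pvIsSecondary (pl : String) : Bool :=
  pl == "runtime" || pl == "outputs" || pl == "agent_outputs"

-- first for-loop of A: return pl on a primary match
def pvScan1 : List String → Option String
  | [] => none
  | part :: rest =>
      let pl := PySem.Str.lower part
      if pvIsPrimary pl then some pl else pvScan1 rest

-- second for-loop of A: return pl on a secondary match
def pvScan2 : List String → Option String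
  | [] => none
  | part :: rest =>
      let pl := PySem.Str.lower part
      if pvIsSecondary pl then some pl else pvScan2 rest

def root_hint_py (parts : List String) : String :=
  match pvScan1 parts with
  | some pl => pl
  | none =>
    match pvScan2 parts with
    | some pl => pl
    | none => "unknown"

-- ===== PORT B =====
-- single pass over parts carrying the fallback accumulator
def pvLoopB : List String → Option String → String
  | [], fallback => match fallback with | some f => f | none => "unknown"
  | part :: rest, fallback =>
      let pl := PySem.Str.lower part
      if pvIsPrimary pl then pl
      else pvLoopB rest (if fallback.isNone && pvIsSecondary pl then some pl else fallback)

def root_hint_py_alt (parts : List String) : String := pvLoopB parts none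

-- ===== PRECONDITION & SPEC =====
def Spec_root_hint_py (parts : List String) (out : String) : Prop := out = root_hint_py_alt parts
instance (parts : List String) (out : String) : Decidable (Spec_root_hint_py parts out) := by unfold Spec_root_hint_py; infer_instance

-- ===== CLAIM (what is proved, stated in full; the proofs are below) =====
def Claim_equal_root_hint_py : Prop := ∀ (parts : List String), Dom_root_hint_py parts → Spec_root_hint_py parts (root_hint_py parts)

-- ===== LEMMAS AND PROOFS =====

-- characterisation of B's loop: primary match wins, else the incoming fallback, else the first secondary
theorem pvLoopB_char (parts : List String) (fb : Option String) :
    pvLoopB parts fb =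
      match pvScan1 parts with
      | some pl => pl
      | none =>
        match fb with
        | some f => f
        | none =>
          match pvScan2 parts with
          | some pl => pl
          | none => "unknown" := by
  induction parts generalizing fb with
  | nil => cases fb <;> simp [pvLoopB, pvScan1, pvScan2]
  | cons part rest ih =>
    simp only [pvLoopB, pvScan1, pvScan2]
    by_cases hp : pvIsPrimary (PySem.Str.lower part)
    · simp [hp]
    · simp only [hp, Bool.false_eq_true, ite_false, ih]
      cases fb with
      | some f => simp
      | none =>
        by_cases hs : pvIsSecondary (PySem.Str.lower part)
        · simp [hs]
        · simp [hs]

-- ===== VERDICT (by name: the statement is the Claim_ definition above) =====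
theorem root_hint_py_spec : Claim_equal_root_hint_py := by
  intro parts _
  unfold Spec_root_hint_py root_hint_py root_hint_py_alt
  rw [pvLoopB_char]
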